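-- pv_equiv track=rewrite | github.com/MrBrantCode/unitest_baseline | mut_generate/mist_train_taco/taco_15972/solution.py | calculate_unique_chars_sum
-- ===== SOURCE A (Python) =====
-- from collections import defaultdict
--
-- def calculate_unique_chars_sum(s: str) -> int:
--     chrLoc = defaultdict(list)
--     ct = 0
--     md = 1000000007
--     l = len(s)
--
--     # Record the positions of each character in the string
--     for i, c in enumerate(s):
--         chrLoc[c].append(i)
--
--     # Calculate the sum of unique characters in all substrings
--     for c in chrLoc:
--         locs = [-1] + chrLoc[c] + [l]
--         loc_ct = len(locs)
--         for i in range(1, loc_ct - 1):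
--             leftWingSpan = locs[i] - locs[i - 1]
--             rightWingSpan = locs[i + 1] - locs[i]
--             ct += leftWingSpan % md * (rightWingSpan % md) % md
--             ct %= md
--
--     return ct
-- ===== SOURCE B (Python) =====
-- def calculate_unique_chars_sum(s: str) -> int:
--     # One left-to-right pass keeping, per character, its last two occurrence
--     # positions; each occurrence's span product is added when it is "closed"
--     # by the next occurrence (or by the final flush at end of string).
--     md = 1000000007
--     ct = 0
--     last = {}  # c -> (second-last position or -1, last position)
--     for i, c in enumerate(s):
--         pair = last.get(c)
--         if pair is None:
--             last[c] = (-1, i)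
--         else:
--             p2, p = pair
--             ct += (p - p2) % md * ((i - p) % md) % md
--             ct %= md
--             last[c] = (p, i)
--     n = len(s)
--     for p2, p in last.values():
--         ct += (p - p2) % md * ((n - p) % md) % md
--         ct %= md
--     return ct
-- ===== Notes on version B (the rewrite author's own statement) =====
-- stated objective: alternative
-- what changed: Replaces A's two-phase approach (build a dict of all occurrence positions per character, then a second indexed loop over [-1]+locs+[len] per character) by a single left-to-right scan that keeps only the last two occurrence positions per character, adding each occurrence's left*right span product when the next occurrence closes it, with a final flush per character.
import Mathlib
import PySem

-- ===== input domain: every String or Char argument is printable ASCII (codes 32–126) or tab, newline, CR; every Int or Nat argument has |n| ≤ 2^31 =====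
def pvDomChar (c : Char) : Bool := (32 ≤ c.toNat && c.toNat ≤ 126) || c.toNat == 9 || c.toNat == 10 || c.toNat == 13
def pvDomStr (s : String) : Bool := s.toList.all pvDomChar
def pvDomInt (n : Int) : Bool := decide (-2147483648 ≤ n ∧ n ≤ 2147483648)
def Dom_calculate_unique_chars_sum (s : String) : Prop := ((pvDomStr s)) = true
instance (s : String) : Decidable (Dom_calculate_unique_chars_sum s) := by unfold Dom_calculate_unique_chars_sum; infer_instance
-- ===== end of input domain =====

-- B replaces A's two-phase (all-positions dict, then an indexed per-character loop) computation by a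
-- single left-to-right scan keeping only the last two positions per character (an alternative decomposition
-- with the same O(n) asymptotics; equivalence of the RETURN value is what is proved).

-- ===== PORT A =====
def calculate_unique_chars_sum (s : String) : Int :=
  let md : Int := 1000000007
  let l : Int := PySem.Str.len s
  -- for i, c in enumerate(s): chrLoc[c].append(i)   (defaultdict(list))
  let chrLoc : PySem.Dict Char (List Int) :=
    (PySem.List.enumerate s.toList 0).foldl
      (fun d ic => d.modify ic.2 [] (fun ps => ps ++ [ic.1])) PySem.Dict.empty
  -- for c in chrLoc: … inner loop over locs = [-1] + chrLoc[c] + [l]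
  chrLoc.items.foldl (fun ct cv =>
    let locs : List Int := [-1] ++ cv.2 ++ [l]
    let loc_ct : Int := (locs.length : Int)
    (PySem.List.pyRange 1 (loc_ct - 1) 1).foldl (fun ct i =>
      -- indices i-1, i, i+1 are always in range for locs
      let leftWingSpan : Int := PySem.List.pyGetD locs i 0 - PySem.List.pyGetD locs (i - 1) 0
      let rightWingSpan : Int := PySem.List.pyGetD locs (i + 1) 0 - PySem.List.pyGetD locs i 0
      PySem.Int.mod (ct + PySem.Int.mod (PySem.Int.mod leftWingSpan md * PySem.Int.mod rightWingSpan md) md) md) ct) 0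

-- ===== PORT B =====
-- loop body of B's scan: close the previous occurrence of c (if any) and shift (prev2, prev)
def pvStepB (st : Int × PySem.Dict Char (Int × Int)) (ic : Int × Char) :
    Int × PySem.Dict Char (Int × Int) :=
  match st.2.get? ic.2 with
  | none => (st.1, st.2.insert ic.2 (-1, ic.1))
  | some pr =>
      (PySem.Int.mod (st.1 + PySem.Int.mod (PySem.Int.mod (pr.2 - pr.1) 1000000007 *
         PySem.Int.mod (ic.1 - pr.2) 1000000007) 1000000007) 1000000007,
       st.2.insert ic.2 (pr.2, ic.1))

def calculate_unique_chars_sum_alt (s : String) : Int :=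
  let scan := (PySem.List.enumerate s.toList 0).foldl pvStepB (0, PySem.Dict.empty)
  let n : Int := PySem.Str.len s
  -- for p2, p in last.values(): flush the final occurrence of each character
  scan.2.values.foldl (fun ct pr =>
    PySem.Int.mod (ct + PySem.Int.mod (PySem.Int.mod (pr.2 - pr.1) 1000000007 *
      PySem.Int.mod (n - pr.2) 1000000007) 1000000007) 1000000007) scan.1

-- ===== PRECONDITION & SPEC =====
def Spec_calculate_unique_chars_sum (s : String) (out : Int) : Prop := out = calculate_unique_chars_sum_alt s
instance (s : String) (out : Int) : Decidable (Spec_calculate_unique_chars_sum s out) := by unfold Spec_calculate_unique_chars_sum; infer_instance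

-- ===== CLAIM (what is proved, stated in full; the proofs are below) =====
def Claim_equal_calculate_unique_chars_sum : Prop := ∀ (s : String), Dom_calculate_unique_chars_sum s → Spec_calculate_unique_chars_sum s (calculate_unique_chars_sum s)


-- ===== LEMMAS AND PROOFS =====

-- the span-product term (p-a) % md * ((b-p) % md) % md
def pvTerm (x y : Int) : Int :=
  PySem.Int.mod (PySem.Int.mod x 1000000007 * PySem.Int.mod y 1000000007) 1000000007

-- A's inner-loop summand, as a function of the index j into locs
def pvG (locs : List Int) (j : Int) : Int :=
  pvTerm (PySem.List.pyGetD locs j 0 - PySem.List.pyGetD locs (j - 1) 0)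
         (PySem.List.pyGetD locs (j + 1) 0 - PySem.List.pyGetD locs j 0)

-- (second-last, last) of a position list, prev standing in for a missing second-last
def pvLast : Int → List Int → Int × Int
  | prev, [] => (prev, prev)
  | prev, [p] => (prev, p)
  | _, p :: q :: rest => pvLast p (q :: rest)

-- sum of the span products of all but the last occurrence (independent of the string length)
def pvClosed : Int → List Int → Int
  | _, [] => 0
  | _, [_] => 0
  | prev, p :: q :: rest => pvTerm (p - prev) (q - p) + pvClosed p (q :: rest)

-- sum of the span products of all occurrences, the last one capped by l
def pvTot (l : Int) : Int → List Int → Int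
  | _, [] => 0
  | prev, p :: rest => pvTerm (p - prev) (rest.headD l - p) + pvTot l p rest

-- occurrence positions of c in a list of (index, char) pairs
def pvOcc (E : List (Int × Char)) (c : Char) : List Int :=
  (E.filter (fun q => q.2 == c)).map (·.1)

-- the distinct chars, in first-occurrence order
def pvK (E : List (Int × Char)) : List Char := PySem.Set.ofList (E.map (·.2))

-- invariant of B's scan state after consuming E
def pvInv (E : List (Int × Char)) (st : Int × PySem.Dict Char (Int × Int)) : Prop :=
  st.2.items = (pvK E).map (fun c => (c, pvLast (-1) (pvOcc E c))) ∧
  st.1 = PySem.Int.mod (((pvK E).map (fun c => pvClosed (-1) (pvOcc E c))).sum) 1000000007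

lemma pvmod_add (S t : Int) :
    PySem.Int.mod (PySem.Int.mod S 1000000007 + t) 1000000007 = PySem.Int.mod (S + t) 1000000007 := by
  rw [PySem.Int.mod_eq_emod_of_pos (by norm_num), PySem.Int.mod_eq_emod_of_pos (by norm_num),
      PySem.Int.mod_eq_emod_of_pos (by norm_num)]
  omega

lemma pv_modfold {α : Type} (f : α → Int) : ∀ (L : List α) (S : Int),
    L.foldl (fun a x => PySem.Int.mod (a + f x) 1000000007) (PySem.Int.mod S 1000000007)
      = PySem.Int.mod (S + (L.map f).sum) 1000000007
  | [], S => by simp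
  | x :: L, S => by
      simp only [List.foldl_cons, List.map_cons, List.sum_cons]
      rw [pvmod_add, pv_modfold f L (S + f x)]
      ring_nf

lemma pv_getD_cons (x : Int) (xs : List Int) (j : Int) (hj : 1 ≤ j) :
    PySem.List.pyGetD (x :: xs) j 0 = PySem.List.pyGetD xs (j - 1) 0 := by
  obtain ⟨n, rfl⟩ : ∃ n : ℕ, j = (n : Int) + 1 := ⟨(j - 1).toNat, by omega⟩
  have h1 : ((n : Int) + 1) = ((n + 1 : ℕ) : Int) := by push_cast; ring
  have h2 : ((n : Int) + 1) - 1 = ((n : ℕ) : Int) := by ring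
  rw [h2, PySem.List.pyGetD_natCast, h1, PySem.List.pyGetD_natCast]
  simp [List.getD]

lemma pv_shift (x : Int) (xs : List Int) : ∀ (n : ℕ) (a b : Int), (b - a).toNat = n → 2 ≤ a →
    (PySem.List.pyRange a b 1).map (pvG (x :: xs)) = (PySem.List.pyRange (a - 1) (b - 1) 1).map (pvG xs)
  | 0, a, b, hn, ha => by
      rw [PySem.List.pyRange_one_eq_nil (by omega), PySem.List.pyRange_one_eq_nil (by omega)]
      simp
  | n + 1, a, b, hn, ha => by
      rw [PySem.List.pyRange_one_cons (by omega), PySem.List.pyRange_one_cons (by omega : a - 1 < b - 1)]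
      simp only [List.map_cons]
      have hhead : pvG (x :: xs) a = pvG xs (a - 1) := by
        unfold pvG
        rw [pv_getD_cons x xs a (by omega), pv_getD_cons x xs (a - 1) (by omega),
            pv_getD_cons x xs (a + 1) (by omega)]
        norm_num
      have htail := pv_shift x xs n (a + 1) b (by omega) (by omega)
      rw [hhead, htail]
      norm_num

lemma pv_headD (rest : List Int) (l : Int) :
    PySem.List.pyGetD (rest ++ [l]) 0 0 = rest.headD l := by
  cases rest <;> simp [PySem.List.pyGetD_zero_cons]

lemma pv_inner (l : Int) : ∀ (ps : List Int) (prev : Int),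
    ((PySem.List.pyRange 1 (1 + (ps.length : Int)) 1).map (pvG (prev :: (ps ++ [l])))).sum
      = pvTot l prev ps
  | [], prev => by
      rw [PySem.List.pyRange_one_eq_nil (by norm_num)]
      simp [pvTot]
  | p :: rest, prev => by
      have h1 : (1 : Int) < 1 + ((p :: rest).length : Int) := by
        simp only [List.length_cons]; push_cast; omega
      rw [PySem.List.pyRange_one_cons h1, List.map_cons, List.sum_cons]
      simp only [List.cons_append]
      have e0 : PySem.List.pyGetD (prev :: p :: (rest ++ [l])) 0 0 = prev :=
        PySem.List.pyGetD_zero_cons _ _ _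
      have e1 : PySem.List.pyGetD (prev :: p :: (rest ++ [l])) 1 0 = p := by
        rw [pv_getD_cons _ _ 1 le_rfl, show (1 : Int) - 1 = 0 from rfl,
            PySem.List.pyGetD_zero_cons]
      have e2 : PySem.List.pyGetD (prev :: p :: (rest ++ [l])) 2 0 = rest.headD l := by
        rw [pv_getD_cons _ _ 2 (by norm_num), show (2 : Int) - 1 = 1 from rfl,
            pv_getD_cons _ _ 1 le_rfl, show (1 : Int) - 1 = 0 from rfl, pv_headD]
      have hhead : pvG (prev :: p :: (rest ++ [l])) 1 = pvTerm (p - prev) (rest.headD l - p) := by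
        unfold pvG
        rw [show (1 : Int) - 1 = 0 from rfl, show (1 : Int) + 1 = 2 from rfl, e0, e1, e2]
      have htail : (PySem.List.pyRange (1 + 1) (1 + ((p :: rest).length : Int)) 1).map
          (pvG (prev :: p :: (rest ++ [l])))
          = (PySem.List.pyRange 1 (1 + (rest.length : Int)) 1).map (pvG (p :: (rest ++ [l]))) := by
        rw [pv_shift prev (p :: (rest ++ [l]))
              ((1 + ((p :: rest).length : Int)) - (1 + 1)).toNat (1 + 1)
              (1 + ((p :: rest).length : Int)) rfl (by norm_num),
            show ((1 : Int) + 1 - 1) = 1 from by norm_num,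
            show (1 + ((p :: rest).length : Int) - 1) = 1 + (rest.length : Int) from by
              simp only [List.length_cons]; push_cast; ring]
      rw [hhead, htail, pv_inner l rest p]
      simp [pvTot]

lemma pv_tot_split (l : Int) : ∀ (ps : List Int) (prev : Int), ps ≠ [] →
    pvTot l prev ps = pvClosed prev ps
      + pvTerm ((pvLast prev ps).2 - (pvLast prev ps).1) (l - (pvLast prev ps).2)
  | [], _, h => absurd rfl h
  | [p], prev, _ => by simp [pvTot, pvClosed, pvLast]
  | p :: q :: rest, prev, _ => by
      have ih := pv_tot_split l (q :: rest) p (by simp)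
      simp only [pvTot, pvClosed, pvLast, List.headD_cons] at ih ⊢
      linear_combination ih

lemma pv_last_snoc : ∀ (ps : List Int) (prev i : Int), ps ≠ [] →
    pvLast prev (ps ++ [i]) = ((pvLast prev ps).2, i)
  | [], _, _, h => absurd rfl h
  | [p], prev, i, _ => by simp [pvLast]
  | p :: q :: rest, prev, i, _ => by
      simp only [List.cons_append, pvLast]
      exact pv_last_snoc (q :: rest) p i (by simp)

lemma pv_closed_snoc : ∀ (ps : List Int) (prev i : Int), ps ≠ [] →
    pvClosed prev (ps ++ [i]) = pvClosed prev ps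
      + pvTerm ((pvLast prev ps).2 - (pvLast prev ps).1) (i - (pvLast prev ps).2)
  | [], _, _, h => absurd rfl h
  | [p], prev, i, _ => by simp [pvClosed, pvLast]
  | p :: q :: rest, prev, i, _ => by
      have ih := pv_closed_snoc (q :: rest) p i (by simp)
      simp only [List.cons_append, pvClosed, pvLast] at ih ⊢
      linear_combination ih

lemma pv_occ_snoc (E : List (Int × Char)) (i : Int) (x c : Char) :
    pvOcc (E ++ [(i, x)]) c = pvOcc E c ++ (if c = x then [i] else []) := by
  by_cases h : c = x
  · subst h
    simp [pvOcc, List.filter_append]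
  · simp [pvOcc, List.filter_append, h, Ne.symm h]

lemma pv_occ_ne_nil {E : List (Int × Char)} {c : Char} (h : c ∈ E.map (·.2)) :
    pvOcc E c ≠ [] := by
  obtain ⟨q, hq, rfl⟩ := List.mem_map.1 h
  have : q.1 ∈ pvOcc E q.2 := by
    exact List.mem_map_of_mem (List.mem_filter.2 ⟨hq, by simp⟩)
  exact List.ne_nil_of_mem this

lemma pv_occ_nil_of_not_mem {E : List (Int × Char)} {x : Char} (h : x ∉ E.map (·.2)) :
    pvOcc E x = [] := by
  simp only [pvOcc, List.map_eq_nil_iff, List.filter_eq_nil_iff]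
  intro q hq
  simp only [beq_iff_eq]
  intro hx
  exact h (by simpa [hx] using List.mem_map_of_mem (f := (·.2)) hq)

lemma pv_sum_update (x : Char) (d : Int) : ∀ (L : List Char) (f g : Char → Int), L.Nodup → x ∈ L →
    (∀ c ∈ L, c ≠ x → g c = f c) → g x = f x + d →
    (L.map g).sum = (L.map f).sum + d
  | [], _, _, _, hx, _, _ => absurd hx (by simp)
  | c :: L, f, g, hnd, hx, hagree, hgx => by
      simp only [List.map_cons, List.sum_cons]
      rcases List.mem_cons.1 hx with rfl | hxL
      · have : L.map g = L.map f := by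
          apply List.map_congr_left
          intro c' hc'
          exact hagree c' (List.mem_cons_of_mem _ hc') (fun hc'x => (List.nodup_cons.1 hnd).1 (hc'x ▸ hc'))
        rw [this, hgx]; ring
      · have hcx : c ≠ x := fun hcc => (List.nodup_cons.1 hnd).1 (hcc ▸ hxL)
        rw [hagree c (by simp) hcx,
            pv_sum_update x d L f g (List.nodup_cons.1 hnd).2 hxL
              (fun c' hc' => hagree c' (List.mem_cons_of_mem _ hc')) hgx]
        ring

lemma pv_step {Q : List (Int × Char)} {st : Int × PySem.Dict Char (Int × Int)}
    (q : Int × Char) (h : pvInv Q st) : pvInv (Q ++ [q]) (pvStepB st q) := by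
  obtain ⟨i, x⟩ := q
  obtain ⟨hitems, hct⟩ := h
  have hkeys : st.2.keys = pvK Q := by
    show st.2.items.map (·.1) = pvK Q
    rw [hitems, List.map_map]
    simp [Function.comp_def]
  have hnd : st.2.keys.Nodup := by rw [hkeys]; exact PySem.Set.nodup_ofList _
  by_cases hx : x ∈ pvK Q
  · -- x seen before: close its previous occurrence
    have hne : pvOcc Q x ≠ [] := pv_occ_ne_nil ((PySem.Set.mem_ofList _ _).1 hx)
    have hget : st.2.get? x = some (pvLast (-1) (pvOcc Q x)) :=
      PySem.Dict.get?_of_mem_items _ (hitems ▸ List.mem_map_of_mem hx) hnd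
    have hcont : st.2.contains x = true := (PySem.Dict.contains_iff_mem_keys _ _).2 (hkeys ▸ hx)
    have hK'' : pvK (Q ++ [(i, x)]) = PySem.Set.add (pvK Q) x := by
      simp only [pvK, List.map_append, List.map_cons, List.map_nil]
      exact PySem.Set.ofList_append_singleton _ _
    have hK' : pvK (Q ++ [(i, x)]) = pvK Q := hK''.trans (PySem.Set.add_of_mem hx)
    constructor
    · show (pvStepB st (i, x)).2.items = _
      simp only [pvStepB, hget]
      rw [PySem.Dict.items_insert_of_contains _ _ hcont, hitems, List.map_map, hK']
      apply List.map_congr_left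
      intro c hc
      by_cases hcx : c = x
      · subst hcx
        simp only [Function.comp_apply, beq_self_eq_true, if_pos]
        rw [pv_occ_snoc, if_pos rfl, pv_last_snoc _ _ _ hne]
      · simp only [Function.comp_apply, beq_iff_eq, if_neg hcx]
        rw [pv_occ_snoc, if_neg hcx, List.append_nil]
    · show (pvStepB st (i, x)).1 = _
      simp only [pvStepB, hget]
      rw [hct, hK']
      have hterm : PySem.Int.mod (PySem.Int.mod ((pvLast (-1) (pvOcc Q x)).2 - (pvLast (-1) (pvOcc Q x)).1) 1000000007 *
          PySem.Int.mod (i - (pvLast (-1) (pvOcc Q x)).2) 1000000007) 1000000007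
          = pvTerm ((pvLast (-1) (pvOcc Q x)).2 - (pvLast (-1) (pvOcc Q x)).1) (i - (pvLast (-1) (pvOcc Q x)).2) := rfl
      have hagree : ∀ c ∈ pvK Q, c ≠ x →
          pvClosed (-1) (pvOcc (Q ++ [(i, x)]) c) = pvClosed (-1) (pvOcc Q c) := by
        intro c hc hcx
        rw [pv_occ_snoc, if_neg hcx, List.append_nil]
      have hgx : pvClosed (-1) (pvOcc (Q ++ [(i, x)]) x)
          = pvClosed (-1) (pvOcc Q x)
            + pvTerm ((pvLast (-1) (pvOcc Q x)).2 - (pvLast (-1) (pvOcc Q x)).1)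
                (i - (pvLast (-1) (pvOcc Q x)).2) := by
        rw [pv_occ_snoc, if_pos rfl]
        exact pv_closed_snoc _ _ _ hne
      have hsum := pv_sum_update x _ (pvK Q)
        (fun c => pvClosed (-1) (pvOcc Q c))
        (fun c => pvClosed (-1) (pvOcc (Q ++ [(i, x)]) c))
        (PySem.Set.nodup_ofList _) hx hagree hgx
      rw [hterm, pvmod_add, hsum]
  · -- first occurrence of x
    have hocc : pvOcc Q x = [] := pv_occ_nil_of_not_mem (fun hm => hx ((PySem.Set.mem_ofList _ _).2 hm))
    have hget : st.2.get? x = none := (PySem.Dict.get?_eq_none_iff_not_mem_keys _ _).2 (by rw [hkeys]; exact hx)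
    have hcont : st.2.contains x = false := by
      rw [PySem.Dict.contains_eq_decide_mem_keys, hkeys]
      simp [hx]
    have hK'' : pvK (Q ++ [(i, x)]) = PySem.Set.add (pvK Q) x := by
      simp only [pvK, List.map_append, List.map_cons, List.map_nil]
      exact PySem.Set.ofList_append_singleton _ _
    have hK' : pvK (Q ++ [(i, x)]) = pvK Q ++ [x] := hK''.trans (PySem.Set.add_of_not_mem hx)
    constructor
    · show (pvStepB st (i, x)).2.items = _
      simp only [pvStepB, hget]
      rw [PySem.Dict.items_insert_of_not_contains _ _ hcont, hitems, hK', List.map_append]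
      congr 1
      · apply List.map_congr_left
        intro c hc
        have hcx : c ≠ x := fun hcc => hx (hcc ▸ hc)
        rw [pv_occ_snoc, if_neg hcx, List.append_nil]
      · simp only [List.map_cons, List.map_nil]
        rw [pv_occ_snoc, if_pos rfl, hocc]
        rfl
    · show (pvStepB st (i, x)).1 = _
      simp only [pvStepB, hget]
      have h1 : (pvK Q).map (fun c => pvClosed (-1) (pvOcc (Q ++ [(i, x)]) c))
          = (pvK Q).map (fun c => pvClosed (-1) (pvOcc Q c)) :=
        List.map_congr_left (fun c hc => by
          have hcx : c ≠ x := fun hcc => hx (hcc ▸ hc)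
          rw [pv_occ_snoc, if_neg hcx, List.append_nil])
      have h2 : pvClosed (-1) (pvOcc (Q ++ [(i, x)]) x) = 0 := by
        rw [pv_occ_snoc, if_pos rfl, hocc]
        simp [pvClosed]
      rw [hct, hK', List.map_append, List.sum_append, h1]
      simp [h2]

lemma pv_scan : ∀ (E Q : List (Int × Char)) (st : Int × PySem.Dict Char (Int × Int)),
    pvInv Q st → pvInv (Q ++ E) (E.foldl pvStepB st)
  | [], Q, st, h => by simpa using h
  | q :: E, Q, st, h => by
      have h2 := pv_scan E (Q ++ [q]) (pvStepB st q) (pv_step q h)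
      simpa [List.append_assoc] using h2

lemma pv_inv_nil : pvInv [] (0, PySem.Dict.empty) := by
  constructor <;> decide

lemma pv_build_getD : ∀ (E : List (Int × Char)) (d : PySem.Dict Char (List Int)) (c : Char),
    (E.foldl (fun d ic => d.modify ic.2 [] (fun ps => ps ++ [ic.1])) d).getD c []
      = d.getD c [] ++ (E.filter (fun q => q.2 == c)).map (·.1)
  | [], d, c => by simp
  | (i, x) :: E, d, c => by
      simp only [List.foldl_cons, List.filter_cons]
      rw [pv_build_getD E _ c, PySem.Dict.getD_modify]
      by_cases h : c = x
      · subst h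
        simp [List.append_assoc]
      · simp [h, Ne.symm h]

lemma pv_build_keys : ∀ (E : List (Int × Char)) (d : PySem.Dict Char (List Int)),
    (E.foldl (fun d ic => d.modify ic.2 [] (fun ps => ps ++ [ic.1])) d).keys
      = PySem.Set.update d.keys (E.map (·.2))
  | [], d => by simp [PySem.Set.update_nil]
  | (i, x) :: E, d => by
      simp only [List.foldl_cons, List.map_cons]
      rw [pv_build_keys E _, PySem.Set.update_cons, PySem.Dict.keys_modify]
      congr 1
      by_cases h : d.contains x
      · rw [PySem.Dict.keys_insert_of_contains _ _ h,
            PySem.Set.add_of_mem ((PySem.Dict.contains_iff_mem_keys _ _).1 h)]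
      · have hf : d.contains x = false := by simpa using h
        rw [PySem.Dict.keys_insert_of_not_contains _ _ hf,
            PySem.Set.add_of_not_mem (fun hm => h ((PySem.Dict.contains_iff_mem_keys _ _).2 hm))]

lemma pv_outer (l : Int) : ∀ (L : List (Char × List Int)) (ct S : Int),
    ct = PySem.Int.mod S 1000000007 →
    L.foldl (fun ct cv =>
      (PySem.List.pyRange 1 ((((-1 :: (cv.2 ++ [l])).length : Nat) : Int) - 1) 1).foldl
        (fun a j => PySem.Int.mod (a + pvG (-1 :: (cv.2 ++ [l])) j) 1000000007) ct) ct
    = PySem.Int.mod (S + (L.map (fun cv => pvTot l (-1) cv.2)).sum) 1000000007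
  | [], ct, S, hct => by simpa using hct
  | cv :: L, ct, S, hct => by
      simp only [List.foldl_cons, List.map_cons, List.sum_cons]
      have hb : ((((-1 :: (cv.2 ++ [l])).length : Nat) : Int) - 1) = 1 + ((cv.2).length : Int) := by
        simp only [List.length_cons, List.length_append, List.length_nil]
        push_cast; ring
      rw [hb, hct, pv_modfold (fun j => pvG (-1 :: (cv.2 ++ [l])) j) _ S]
      have hmap : ((PySem.List.pyRange 1 (1 + ((cv.2).length : Int)) 1).map
          (fun j => pvG (-1 :: (cv.2 ++ [l])) j)).sum = pvTot l (-1) cv.2 := pv_inner l cv.2 (-1)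
      rw [hmap, pv_outer l L _ (S + pvTot l (-1) cv.2) rfl]
      ring_nf

lemma pv_A (s : String) : calculate_unique_chars_sum s
    = PySem.Int.mod (((pvK (PySem.List.enumerate s.toList 0)).map
        (fun c => pvTot ((s.toList.length : Int)) (-1)
          (pvOcc (PySem.List.enumerate s.toList 0) c))).sum) 1000000007 := by
  simp only [calculate_unique_chars_sum, PySem.Str.len_eq]
  simp only [List.cons_append, List.nil_append]
  have hkeys := pv_build_keys (PySem.List.enumerate s.toList 0) PySem.Dict.empty
  rw [PySem.Dict.keys_empty, PySem.Set.update_nil_left] at hkeys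
  have hnd : ((PySem.List.enumerate s.toList 0).foldl
      (fun d ic => d.modify ic.2 [] (fun ps => ps ++ [ic.1])) PySem.Dict.empty).keys.Nodup := by
    rw [hkeys]; exact PySem.Set.nodup_ofList _
  have hitems : ((PySem.List.enumerate s.toList 0).foldl
      (fun d ic => d.modify ic.2 [] (fun ps => ps ++ [ic.1])) PySem.Dict.empty).items
      = (pvK (PySem.List.enumerate s.toList 0)).map
        (fun c => (c, pvOcc (PySem.List.enumerate s.toList 0) c)) := by
    rw [PySem.Dict.items_eq_map_keys _ hnd [], hkeys]
    apply List.map_congr_left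
    intro c hc
    rw [pv_build_getD, PySem.Dict.getD_empty, List.nil_append]
    rfl
  have hout := pv_outer ((s.toList.length : Int))
    (((PySem.List.enumerate s.toList 0).foldl
      (fun d ic => d.modify ic.2 [] (fun ps => ps ++ [ic.1])) PySem.Dict.empty).items)
    0 0 (by decide)
  simp only [pvG, pvTerm] at hout
  rw [hout, hitems, List.map_map]
  simp [Function.comp_def]

lemma pv_B (s : String) : calculate_unique_chars_sum_alt s
    = PySem.Int.mod ((((pvK (PySem.List.enumerate s.toList 0)).map
        (fun c => pvClosed (-1) (pvOcc (PySem.List.enumerate s.toList 0) c))).sum)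
      + ((pvK (PySem.List.enumerate s.toList 0)).map
        (fun c => pvTerm ((pvLast (-1) (pvOcc (PySem.List.enumerate s.toList 0) c)).2
            - (pvLast (-1) (pvOcc (PySem.List.enumerate s.toList 0) c)).1)
          ((s.toList.length : Int) - (pvLast (-1) (pvOcc (PySem.List.enumerate s.toList 0) c)).2))).sum)
      1000000007 := by
  simp only [calculate_unique_chars_sum_alt, PySem.Str.len_eq]
  have hinv := pv_scan (PySem.List.enumerate s.toList 0) [] (0, PySem.Dict.empty) pv_inv_nil
  rw [List.nil_append] at hinv
  obtain ⟨hitems, hct⟩ := hinv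
  rw [show ((PySem.List.enumerate s.toList 0).foldl pvStepB (0, PySem.Dict.empty)).2.values
      = ((PySem.List.enumerate s.toList 0).foldl pvStepB (0, PySem.Dict.empty)).2.items.map
          (fun p => p.2) from rfl,
    hitems, List.map_map, List.foldl_map, hct]
  have hout := pv_modfold (fun c =>
    pvTerm ((pvLast (-1) (pvOcc (PySem.List.enumerate s.toList 0) c)).2
        - (pvLast (-1) (pvOcc (PySem.List.enumerate s.toList 0) c)).1)
      ((s.toList.length : Int) - (pvLast (-1) (pvOcc (PySem.List.enumerate s.toList 0) c)).2))
    (pvK (PySem.List.enumerate s.toList 0))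
    ((((pvK (PySem.List.enumerate s.toList 0)).map
        (fun c => pvClosed (-1) (pvOcc (PySem.List.enumerate s.toList 0) c))).sum))
  simp only [pvTerm] at hout
  dsimp only [Function.comp_def]
  simp only [pvTerm]
  exact hout

-- ===== VERDICT (by name: the statement is the Claim_ definition above) =====
theorem calculate_unique_chars_sum_spec : Claim_equal_calculate_unique_chars_sum := by
  intro s _
  unfold Spec_calculate_unique_chars_sum
  rw [pv_A, pv_B]
  congr 1
  have hsplit : (pvK (PySem.List.enumerate s.toList 0)).map
      (fun c => pvTot ((s.toList.length : Int)) (-1) (pvOcc (PySem.List.enumerate s.toList 0) c))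
      = (pvK (PySem.List.enumerate s.toList 0)).map
      (fun c => pvClosed (-1) (pvOcc (PySem.List.enumerate s.toList 0) c)
        + pvTerm ((pvLast (-1) (pvOcc (PySem.List.enumerate s.toList 0) c)).2
            - (pvLast (-1) (pvOcc (PySem.List.enumerate s.toList 0) c)).1)
          ((s.toList.length : Int) - (pvLast (-1) (pvOcc (PySem.List.enumerate s.toList 0) c)).2)) := by
    apply List.map_congr_left
    intro c hc
    exact pv_tot_split _ _ _ (pv_occ_ne_nil ((PySem.Set.mem_ofList _ _).1 hc))
  rw [hsplit, PySem.List.sum_map_add_int]
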